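-- pv_equiv track=rewrite | github.com/Vaniliice23/Site | app.py | _rectify_grid
-- ===== SOURCE A (Python) =====
-- def _rectify_grid(values):
--     """Make rectangular grid from ragged values list by padding with empty strings."""
--     if not values:
--         return []
--     max_cols = max(len(r) for r in values)
--     grid = []
--     for row in values:
--         padded = list(row) + [""] * (max_cols - len(row))
--         grid.append(padded)
--     return grid
-- ===== SOURCE B (Python) =====
-- def _rectify_grid(values):
--     """Make rectangular grid from ragged values list by padding with empty strings."""
--     if not values:
--         return []
--     max_cols = max(len(r) for r in values)
--     cols = [[r[j] if j < len(r) else "" for r in values] for j in range(max_cols)]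
--     return [[cols[j][i] for j in range(max_cols)] for i in range(len(values))]
-- ===== Notes on version B (the rewrite author's own statement) =====
-- stated objective: alternative
-- what changed: B builds the grid column-wise (one column list per index with a safe per-row lookup) and then transposes back by index, instead of padding each row with a computed run of empty strings.
import Mathlib
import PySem

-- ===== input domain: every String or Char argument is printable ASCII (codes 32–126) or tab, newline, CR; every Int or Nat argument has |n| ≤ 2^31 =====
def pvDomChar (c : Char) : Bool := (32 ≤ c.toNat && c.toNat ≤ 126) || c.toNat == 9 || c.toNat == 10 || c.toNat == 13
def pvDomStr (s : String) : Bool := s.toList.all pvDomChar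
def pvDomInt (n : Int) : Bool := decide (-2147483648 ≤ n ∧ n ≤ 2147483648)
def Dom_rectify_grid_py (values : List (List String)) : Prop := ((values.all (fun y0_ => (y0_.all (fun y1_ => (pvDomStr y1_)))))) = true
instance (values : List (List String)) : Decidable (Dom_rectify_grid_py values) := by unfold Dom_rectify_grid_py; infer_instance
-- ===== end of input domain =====

-- B builds the grid column-wise and transposes back by index instead of padding each row; alternative decomposition, same cost.

-- ===== PORT A =====
-- literal port of A: max over row lengths, then each row padded with "" up to max_cols, appended to grid
def rectify_grid_py (values : List (List String)) : List (List String) :=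
  if values = [] then []
  else
    let max_cols := (PySem.List.max? (values.map (fun r => r.length)) (fun x => x)).getD 0
    values.foldl (fun grid row => grid ++ [row ++ List.replicate (max_cols - row.length) ""]) []

-- ===== PORT B =====
-- literal port of B: column lists with safe lookup (r[j] if j < len(r) else "" = r.getD j ""),
-- then transpose by indexing; cols[j] and cols[j][i] are always in range, ported as getD (exact here).
def rectify_grid_py_alt (values : List (List String)) : List (List String) :=
  if values = [] then []
  else
    let max_cols := (PySem.List.max? (values.map (fun r => r.length)) (fun x => x)).getD 0
    let cols := (List.range max_cols).map (fun j => values.map (fun r => if j < r.length then r.getD j "" else ""))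
    (List.range values.length).map (fun i => (List.range max_cols).map (fun j => (cols.getD j []).getD i ""))

-- ===== PRECONDITION & SPEC =====
def Spec_rectify_grid_py (values : List (List String)) (out : List (List String)) : Prop := out = rectify_grid_py_alt values
instance (values : List (List String)) (out : List (List String)) : Decidable (Spec_rectify_grid_py values out) := by unfold Spec_rectify_grid_py; infer_instance

-- ===== CLAIM (what is proved, stated in full; the proofs are below) =====
def Claim_equal_rectify_grid_py : Prop := ∀ (values : List (List String)), Dom_rectify_grid_py values → Spec_rectify_grid_py values (rectify_grid_py values)

-- ===== LEMMAS AND PROOFS =====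

-- a padded row equals the row read off column indices 0..M-1
theorem pad_eq_range (row : List String) (M : Nat) (h : row.length ≤ M) :
    row ++ List.replicate (M - row.length) "" =
      (List.range M).map (fun j => if j < row.length then row.getD j "" else "") := by
  apply List.ext_getElem
  · simp; omega
  · intro k hk1 hk2
    simp only [List.getElem_map, List.getElem_range]
    by_cases hkr : k < row.length
    · rw [List.getElem_append_left hkr]
      simp [hkr, List.getD_eq_getElem?_getD]
    · rw [List.getElem_append_right (by omega)]
      simp [hkr]

-- ===== VERDICT (by name: the statement is the Claim_ definition above) =====
theorem rectify_grid_py_spec : Claim_equal_rectify_grid_py := by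
  intro values _
  unfold Spec_rectify_grid_py rectify_grid_py rectify_grid_py_alt
  by_cases hv : values = []
  · simp [hv]
  · simp only [hv, if_false]
    set M := (PySem.List.max? (values.map (fun r => r.length)) (fun x => x)).getD 0 with hM
    -- every row length is at most M
    have hlen : ∀ r ∈ values, r.length ≤ M := by
      intro r hr
      obtain ⟨m, hm⟩ : ∃ m, PySem.List.max? (values.map (fun r => r.length)) (fun x => x) = some m := by
        cases hmx : PySem.List.max? (values.map (fun r => r.length)) (fun x => x) with
        | none =>
          exact absurd (List.map_eq_nil_iff.mp ((PySem.List.max?_eq_none_iff _ _).mp hmx)) hv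
        | some m => exact ⟨m, rfl⟩
      have := PySem.List.max?_isMax hm r.length (List.mem_map_of_mem hr)
      simpa [hM, hm] using this
    rw [PySem.List.foldl_append_singleton_eq_map]
    simp only [List.nil_append]
    apply List.ext_getElem
    · simp
    · intro i hi1 hi2
      have hi : i < values.length := by simpa using hi1
      simp only [List.getElem_map, List.getElem_range]
      have hrow : values[i] ∈ values := List.getElem_mem _
      rw [pad_eq_range values[i] M (hlen _ hrow)]
      apply List.map_congr_left
      intro j hj
      rw [List.mem_range] at hj
      have hc : (((List.range M).map (fun j => values.map (fun r => if j < r.length then r.getD j "" else ""))).getD j []) =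
          values.map (fun r => if j < r.length then r.getD j "" else "") := by
        rw [List.getD_eq_getElem?_getD, List.getElem?_map, List.getElem?_range hj]
        rfl
      have hd : (values.map (fun r => if j < r.length then r.getD j "" else "")).getD i "" =
          (if j < values[i].length then values[i].getD j "" else "") := by
        rw [List.getD_eq_getElem?_getD, List.getElem?_map, List.getElem?_eq_getElem hi]
        rfl
      rw [hc, hd]
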